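-- pv_equiv track=rewrite | github.com/ekipo/codeTree | src/codetree/graph/dataflow.py | _trace_backward
-- ===== SOURCE A (Python) =====
-- def _trace_backward(var_name: str, dep_map: dict, call_map: dict,
--                     visited: set | None = None, max_depth: int = 20) -> list[str]:
--     """Trace backward from a variable to its origins."""
--     if visited is None:
--         visited = set()
--     if var_name in visited or max_depth <= 0:
--         return []
--     visited.add(var_name)
--
--     deps = dep_map.get(var_name, [])
--     if not deps:
--         return [var_name]
--
--     chain = []
--     for dep in deps:
--         sub_chain = _trace_backward(dep, dep_map, call_map, visited, max_depth - 1)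
--         chain.extend(sub_chain)
--     chain.append(var_name)
--     return chain
-- ===== SOURCE B (Python) =====
-- def _trace_backward(var_name: str, dep_map: dict, call_map: dict,
--                     visited: set | None = None, max_depth: int = 20) -> list[str]:
--     """Trace backward from a variable to its origins (iterative DFS, explicit stack)."""
--     if visited is None:
--         visited = set()
--     chain = []
--     stack = [(var_name, max_depth, False)]
--     while stack:
--         node, depth, processed = stack.pop()
--         if processed:
--             chain.append(node)
--             continue
--         if node in visited or depth <= 0:
--             continue
--         visited.add(node)
--         deps = dep_map.get(node, [])
--         if not deps:
--             chain.append(node)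
--             continue
--         stack.append((node, depth, True))
--         for dep in reversed(deps):
--             stack.append((dep, depth - 1, False))
--     return chain
-- ===== Notes on version B (the rewrite author's own statement) =====
-- stated objective: alternative
-- what changed: Replaced A's recursive DFS by an iterative DFS over an explicit stack of (node, depth, processed) frames (deps pushed reversed, nodes emitted on the processed pop), producing the same post-order chain and the same mutation of the shared visited set without using the call stack.
import Mathlib
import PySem

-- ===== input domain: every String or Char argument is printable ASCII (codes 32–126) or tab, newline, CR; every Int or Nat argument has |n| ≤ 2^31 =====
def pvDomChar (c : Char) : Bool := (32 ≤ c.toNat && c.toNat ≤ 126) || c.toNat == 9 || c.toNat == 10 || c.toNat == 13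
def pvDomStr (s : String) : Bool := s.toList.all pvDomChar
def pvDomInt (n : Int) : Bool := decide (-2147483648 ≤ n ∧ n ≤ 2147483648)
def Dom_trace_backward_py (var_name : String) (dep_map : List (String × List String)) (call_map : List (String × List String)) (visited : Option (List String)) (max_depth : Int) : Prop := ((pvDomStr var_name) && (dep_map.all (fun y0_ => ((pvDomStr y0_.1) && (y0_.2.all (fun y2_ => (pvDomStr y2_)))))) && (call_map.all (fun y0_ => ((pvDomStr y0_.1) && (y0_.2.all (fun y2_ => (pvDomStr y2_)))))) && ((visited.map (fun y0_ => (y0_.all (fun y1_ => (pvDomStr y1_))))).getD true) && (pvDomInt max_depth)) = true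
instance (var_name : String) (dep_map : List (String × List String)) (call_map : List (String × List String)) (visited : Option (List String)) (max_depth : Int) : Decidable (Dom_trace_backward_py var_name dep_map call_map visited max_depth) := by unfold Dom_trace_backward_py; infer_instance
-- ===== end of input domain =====

-- B replaces A's recursion by an iterative DFS over an explicit stack of (node, depth, processed)
-- frames (same post-order output, same mutation of the shared visited set); objective: alternative.

-- ===== PORT A =====
-- recursion of A, on fuel = max_depth.toNat (Python returns [] when max_depth <= 0, exactly fuel 0);
-- returns (chain, visited) since the shared visited set threads through the sibling loop
def traceA (d : PySem.Dict String (List String)) : Nat → String → PySem.Set String → List String × PySem.Set String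
  | 0, _, vis => ([], vis)
  | n+1, v, vis =>
    if PySem.Set.contains vis v then ([], vis)
    else
      let vis1 := PySem.Set.add vis v
      let deps := PySem.Dict.getD d v []
      if deps = [] then ([v], vis1)
      else
        let r := deps.foldl (fun (p : List String × PySem.Set String) dep =>
          let s := traceA d n dep p.2
          (p.1 ++ s.1, s.2)) (([] : List String), vis1)
        (r.1 ++ [v], r.2)

def trace_backward_py (var_name : String) (dep_map : List (String × List String)) (call_map : List (String × List String)) (visited : Option (List String)) (max_depth : Int) : List String :=
  (traceA (PySem.Dict.ofList dep_map) max_depth.toNat var_name (PySem.Set.ofList (visited.getD []))).1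

-- ===== PORT B =====
-- stack frames (node, depth, processed), head of the list = top of the stack
-- termination measure: unprocessed frame at depth d weighs 2*(K+1)^d.toNat (K bounds any deps list), processed weighs 1
def depsBound (d : PySem.Dict String (List String)) : Nat := (d.items.map (fun p => p.2.length)).sum

def frameW (d : PySem.Dict String (List String)) (f : String × Int × Bool) : Nat :=
  if f.2.2 then 1 else 2 * (depsBound d + 1) ^ f.2.1.toNat

def stackW (d : PySem.Dict String (List String)) (st : List (String × Int × Bool)) : Nat :=
  (st.map (frameW d)).sum

theorem getD_len_le (d : PySem.Dict String (List String)) (v : String) :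
    (PySem.Dict.getD d v []).length ≤ depsBound d := by
  rw [PySem.Dict.getD_eq_get?_getD]
  rcases h : PySem.Dict.get? d v with _ | l
  · exact Nat.zero_le _
  · have hm : (v, l) ∈ d.items := PySem.Dict.mem_items_of_get?_eq_some d h
    have hlen : l.length ∈ d.items.map (fun p => p.2.length) := List.mem_map.mpr ⟨(v, l), hm, rfl⟩
    simpa using List.single_le_sum (fun x _ => Nat.zero_le x) _ hlen

theorem push_foldl_eq {α β : Type} (g : α → β) :
    ∀ (l : List α) (st : List β),
      l.reverse.foldl (fun st a => g a :: st) st = l.map g ++ st := by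
  intro l
  induction l with
  | nil => intro st; rfl
  | cons a t ih => intro st; simp [List.foldl_append, ih]

theorem measure_push (d : PySem.Dict String (List String)) (deps : List String) (depth : Int)
    (hdep : 0 < depth) (hK : deps.length ≤ depsBound d) :
    ((deps.map (fun dep => (dep, depth - 1, false))).map (frameW d)).sum + 1
      < 2 * (depsBound d + 1) ^ depth.toNat := by
  have he : depth.toNat = (depth - 1).toNat + 1 := by omega
  have hfun : (frameW d ∘ fun dep : String => (dep, depth - 1, (false : Bool)))
      = fun _ => 2 * (depsBound d + 1) ^ (depth - 1).toNat := by
    funext dep; simp [frameW]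
  rw [List.map_map, hfun, List.map_const', List.sum_replicate, smul_eq_mul, he]
  have hpow : 1 ≤ (depsBound d + 1) ^ (depth - 1).toNat := Nat.one_le_pow _ _ (by omega)
  have h1 : deps.length * (2 * (depsBound d + 1) ^ (depth - 1).toNat)
      ≤ depsBound d * (2 * (depsBound d + 1) ^ (depth - 1).toNat) :=
    Nat.mul_le_mul_right _ hK
  have h2 : 2 * (depsBound d + 1) ^ ((depth - 1).toNat + 1)
      = depsBound d * (2 * (depsBound d + 1) ^ (depth - 1).toNat)
        + 2 * (depsBound d + 1) ^ (depth - 1).toNat := by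
    rw [pow_succ]; ring
  omega

def runB (d : PySem.Dict String (List String)) (stack : List (String × Int × Bool))
    (vis : PySem.Set String) (chain : List String) : List String :=
  match stack with
  | [] => chain
  | (node, depth, processed) :: rest =>
    if processed then runB d rest vis (chain ++ [node])
    else if PySem.Set.contains vis node ∨ depth ≤ 0 then runB d rest vis chain
    else
      let vis1 := PySem.Set.add vis node
      let deps := PySem.Dict.getD d node []
      if deps = [] then runB d rest vis1 (chain ++ [node])
      else runB d (deps.reverse.foldl (fun st dep => (dep, depth - 1, false) :: st)
                    ((node, depth, true) :: rest)) vis1 chain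
termination_by stackW d stack
decreasing_by
  · simp_all [stackW, frameW]
  · simp_all [stackW, frameW]
  · simp_all [stackW, frameW]
  · rename_i h1 h2 h3
    rw [push_foldl_eq]
    have hdep : 0 < depth := by
      rcases not_or.mp h2 with ⟨-, hgt⟩; omega
    have hm := measure_push d (PySem.Dict.getD d node []) depth hdep (getD_len_le d node)
    simp only [stackW, List.map_append, List.sum_append, List.map_cons, List.sum_cons]
    have hw1 : frameW d (node, depth, true) = 1 := by simp [frameW]
    have hw2 : frameW d (node, depth, processed) = 2 * (depsBound d + 1) ^ depth.toNat := by
      simp_all [frameW]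
    omega

def trace_backward_py_alt (var_name : String) (dep_map : List (String × List String)) (call_map : List (String × List String)) (visited : Option (List String)) (max_depth : Int) : List String :=
  runB (PySem.Dict.ofList dep_map) [(var_name, max_depth, false)]
    (PySem.Set.ofList (visited.getD [])) []

-- ===== PRECONDITION & SPEC =====
def Spec_trace_backward_py (var_name : String) (dep_map : List (String × List String)) (call_map : List (String × List String)) (visited : Option (List String)) (max_depth : Int) (out : List String) : Prop := out = trace_backward_py_alt var_name dep_map call_map visited max_depth
instance (var_name : String) (dep_map : List (String × List String)) (call_map : List (String × List String)) (visited : Option (List String)) (max_depth : Int) (out : List String) : Decidable (Spec_trace_backward_py var_name dep_map call_map visited max_depth out) := by unfold Spec_trace_backward_py; infer_instance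

-- ===== CLAIM (what is proved, stated in full; the proofs are below) =====
def Claim_equal_trace_backward_py : Prop := ∀ (var_name : String) (dep_map : List (String × List String)) (call_map : List (String × List String)) (visited : Option (List String)) (max_depth : Int), Dom_trace_backward_py var_name dep_map call_map visited max_depth → Spec_trace_backward_py var_name dep_map call_map visited max_depth (trace_backward_py var_name dep_map call_map visited max_depth)

-- ===== LEMMAS AND PROOFS =====

def stepA (d : PySem.Dict String (List String)) (n : Nat)
    (p : List String × PySem.Set String) (dep : String) : List String × PySem.Set String :=
  (p.1 ++ (traceA d n dep p.2).1, (traceA d n dep p.2).2)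

theorem stepA_eq (d : PySem.Dict String (List String)) (n : Nat) :
    (fun (p : List String × PySem.Set String) dep =>
      (p.1 ++ (traceA d n dep p.2).1, (traceA d n dep p.2).2)) = stepA d n := by
  funext p dep; rfl

theorem traceA_succ (d : PySem.Dict String (List String)) (n : Nat) (v : String)
    (vis : PySem.Set String) :
    traceA d (n + 1) v vis =
      if v ∈ vis then ([], vis)
      else if PySem.Dict.getD d v [] = [] then ([v], PySem.Set.add vis v)
      else (((PySem.Dict.getD d v []).foldl (stepA d n) ([], PySem.Set.add vis v)).1 ++ [v],
            ((PySem.Dict.getD d v []).foldl (stepA d n) ([], PySem.Set.add vis v)).2) := by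
  simp [traceA]; rw [stepA_eq]

theorem runB_nil (d : PySem.Dict String (List String)) (vis : PySem.Set String)
    (chain : List String) : runB d [] vis chain = chain := by
  rw [runB]

theorem runB_cons_true (d : PySem.Dict String (List String)) (v : String) (depth : Int)
    (rest : List (String × Int × Bool)) (vis : PySem.Set String) (chain : List String) :
    runB d ((v, depth, true) :: rest) vis chain = runB d rest vis (chain ++ [v]) := by
  rw [runB]; simp

theorem runB_cons_skip (d : PySem.Dict String (List String)) (v : String) (depth : Int)
    (rest : List (String × Int × Bool)) (vis : PySem.Set String) (chain : List String)
    (h : v ∈ vis ∨ depth ≤ 0) :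
    runB d ((v, depth, false) :: rest) vis chain = runB d rest vis chain := by
  rw [runB]; simp [h]

theorem runB_cons_leaf (d : PySem.Dict String (List String)) (v : String) (depth : Int)
    (rest : List (String × Int × Bool)) (vis : PySem.Set String) (chain : List String)
    (h : ¬ (v ∈ vis ∨ depth ≤ 0)) (hd : PySem.Dict.getD d v [] = []) :
    runB d ((v, depth, false) :: rest) vis chain
      = runB d rest (PySem.Set.add vis v) (chain ++ [v]) := by
  rcases not_or.mp h with ⟨h1, h2⟩
  rw [runB]; simp [h1, h2, hd]

theorem runB_cons_expand (d : PySem.Dict String (List String)) (v : String) (depth : Int)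
    (rest : List (String × Int × Bool)) (vis : PySem.Set String) (chain : List String)
    (h : ¬ (v ∈ vis ∨ depth ≤ 0)) (hd : PySem.Dict.getD d v [] ≠ []) :
    runB d ((v, depth, false) :: rest) vis chain
      = runB d ((PySem.Dict.getD d v []).map (fun dep => (dep, depth - 1, false))
            ++ (v, depth, true) :: rest) (PySem.Set.add vis v) chain := by
  rcases not_or.mp h with ⟨h1, h2⟩
  rw [runB]; simp [h1, h2, hd]

theorem foldl_acc_prefix (d : PySem.Dict String (List String)) (n : Nat) :
    ∀ (t : List String) (a : List String) (vis : PySem.Set String),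
      t.foldl (stepA d n) (a, vis)
        = (a ++ (t.foldl (stepA d n) ([], vis)).1, (t.foldl (stepA d n) ([], vis)).2) := by
  intro t
  induction t with
  | nil => intro a vis; simp
  | cons x xs ih =>
    intro a vis
    simp only [List.foldl_cons, stepA, List.nil_append]
    rw [ih (a ++ (traceA d n x vis).1), ih ((traceA d n x vis).1)]
    simp [List.append_assoc]

theorem runB_visits (d : PySem.Dict String (List String)) (m : Nat)
    (ih : ∀ (depth : Int), depth.toNat = m →
      ∀ (v : String) (vis : PySem.Set String) (rest : List (String × Int × Bool))
        (chain : List String),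
        runB d ((v, depth, false) :: rest) vis chain
          = runB d rest (traceA d m v vis).2 (chain ++ (traceA d m v vis).1)) :
    ∀ (l : List String) (depth' : Int), depth'.toNat = m →
      ∀ (vis : PySem.Set String) (rest : List (String × Int × Bool)) (chain : List String),
        runB d (l.map (fun dep => (dep, depth', false)) ++ rest) vis chain
          = runB d rest (l.foldl (stepA d m) ([], vis)).2
              (chain ++ (l.foldl (stepA d m) ([], vis)).1) := by
  intro l
  induction l with
  | nil => intro depth' hd vis rest chain; simp
  | cons x xs ihl =>
    intro depth' hd vis rest chain
    simp only [List.map_cons, List.cons_append, List.foldl_cons, stepA, List.nil_append]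
    rw [ih depth' hd x vis _ chain,
      ihl depth' hd (traceA d m x vis).2 rest (chain ++ (traceA d m x vis).1)]
    rw [foldl_acc_prefix d m xs ((traceA d m x vis).1)]
    simp [List.append_assoc]

theorem runB_visit (d : PySem.Dict String (List String)) :
    ∀ (n : Nat) (depth : Int), depth.toNat = n →
      ∀ (v : String) (vis : PySem.Set String) (rest : List (String × Int × Bool))
        (chain : List String),
        runB d ((v, depth, false) :: rest) vis chain
          = runB d rest (traceA d n v vis).2 (chain ++ (traceA d n v vis).1) := by
  intro n
  induction n with
  | zero =>
    intro depth hdep v vis rest chain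
    rw [runB_cons_skip d v depth rest vis chain (Or.inr (by omega))]
    simp [traceA]
  | succ m ih =>
    intro depth hdep v vis rest chain
    have hpos : ¬ depth ≤ 0 := by omega
    by_cases hv : v ∈ vis
    · rw [runB_cons_skip d v depth rest vis chain (Or.inl hv), traceA_succ]
      simp [hv]
    · have hnot : ¬ (v ∈ vis ∨ depth ≤ 0) := by
        intro hc; rcases hc with hc | hc
        · exact hv hc
        · exact hpos hc
      by_cases hdeps : PySem.Dict.getD d v [] = []
      · rw [runB_cons_leaf d v depth rest vis chain hnot hdeps, traceA_succ]
        simp [hv, hdeps]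
      · rw [runB_cons_expand d v depth rest vis chain hnot hdeps,
          runB_visits d m ih (PySem.Dict.getD d v []) (depth - 1) (by omega)
            (PySem.Set.add vis v) ((v, depth, true) :: rest) chain,
          runB_cons_true, traceA_succ]
        simp [hv, hdeps, List.append_assoc]

-- ===== VERDICT (by name: the statement is the Claim_ definition above) =====
theorem trace_backward_py_spec : Claim_equal_trace_backward_py := by
  intro var_name dep_map call_map visited max_depth _
  unfold Spec_trace_backward_py trace_backward_py trace_backward_py_alt
  rw [runB_visit (PySem.Dict.ofList dep_map) max_depth.toNat max_depth rfl, runB_nil]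
  simp
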